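-- pv_equiv track=rewrite | github.com/tttonyl/student | L02/bcse_2step.py | ttreducer
-- ===== SOURCE A (Python) =====
-- def ttreducer(key, values):
--     topten = []
--     for average, job in values:
--         topten.append((average, job))
--         topten.sort()
--         topten = topten[-10:]
--
--     for average, job in topten:
--         yield key, (average, job)
-- ===== SOURCE B (Python) =====
-- def insert_sorted(top, pair):
--     # recursively place pair into an ascending list, before any equal elements
--     if top and top[0] < pair:
--         return [top[0]] + insert_sorted(top[1:], pair)
--     return [pair] + top
--
-- def ttreducer(key, values):
--     top = []
--     for pair in values:
--         top = insert_sorted(top, pair)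
--         if len(top) > 10:
--             top = top[1:]
--     for average, job in top:
--         yield key, (average, job)
-- ===== Notes on version B (the rewrite author's own statement) =====
-- stated objective: alternative
-- what changed: A re-sorts the whole running list and truncates to the last 10 after every element; B maintains a bounded ascending list by recursive insertion of each element and drops the smallest when it exceeds 10, never calling sort.
import Mathlib
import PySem

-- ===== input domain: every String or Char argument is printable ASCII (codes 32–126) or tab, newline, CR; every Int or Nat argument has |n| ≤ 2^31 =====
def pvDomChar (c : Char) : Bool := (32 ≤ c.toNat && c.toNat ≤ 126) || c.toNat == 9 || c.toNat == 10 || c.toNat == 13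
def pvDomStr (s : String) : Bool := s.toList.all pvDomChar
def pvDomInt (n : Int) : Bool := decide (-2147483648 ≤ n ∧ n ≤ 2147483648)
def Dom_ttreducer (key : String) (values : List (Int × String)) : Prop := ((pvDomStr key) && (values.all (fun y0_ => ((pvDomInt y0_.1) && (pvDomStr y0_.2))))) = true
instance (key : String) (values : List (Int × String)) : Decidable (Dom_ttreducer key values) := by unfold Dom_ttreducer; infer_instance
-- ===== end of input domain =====

-- B keeps a bounded ascending list by recursive insertion of each pair, dropping the
-- smallest element when the list exceeds 10, instead of A's full re-sort-and-truncate
-- after every appended element; same yielded pairs in the same order (objective: alternative).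

-- ===== PORT A =====
def ttreducer (key : String) (values : List (Int × String)) : List (String × (Int × String)) :=
  let topten := values.foldl
    (fun topten p =>
      PySem.List.slice (PySem.List.sorted2 (topten ++ [(p.1, p.2)]) (·.1) (·.2)) (some (-10)) none)
    []
  topten.map (fun p => (key, (p.1, p.2)))

-- ===== PORT B =====
-- insert_sorted from Source B: place pair into an ascending list, before any equal elements
def pvInsertSorted (top : List (Int × String)) (pair : Int × String) : List (Int × String) :=
  match top with
  | [] => [pair]
  | y :: ys => if toLex y < toLex pair then y :: pvInsertSorted ys pair else pair :: y :: ys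

def ttreducer_alt (key : String) (values : List (Int × String)) : List (String × (Int × String)) :=
  let top := values.foldl
    (fun top pair =>
      let t := pvInsertSorted top pair
      if 10 < t.length then PySem.List.slice t (some 1) none else t)
    []
  top.map (fun p => (key, (p.1, p.2)))

-- ===== PRECONDITION & SPEC =====
def Spec_ttreducer (key : String) (values : List (Int × String)) (out : List (String × (Int × String))) : Prop := out = ttreducer_alt key values
instance (key : String) (values : List (Int × String)) (out : List (String × (Int × String))) : Decidable (Spec_ttreducer key values out) := by unfold Spec_ttreducer; infer_instance

-- ===== CLAIM (what is proved, stated in full; the proofs are below) =====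
def Claim_equal_ttreducer : Prop := ∀ (key : String) (values : List (Int × String)), Dom_ttreducer key values → Spec_ttreducer key values (ttreducer key values)

-- ===== LEMMAS AND PROOFS =====

-- Python's tuple sort on (Int, String), i.e. sorted2 fst snd, as a one-key sort under the Lex order.
def pvS (l : List (Int × String)) : List (Int × String) :=
  PySem.List.sorted l (fun p => toLex p)

-- the strict 'before' predicate of that sort
def pvBf (a b : Int × String) : Bool := decide (toLex a < toLex b)

-- xs[-10:] on the proof side
def pvLastTen (l : List (Int × String)) : List (Int × String) := l.drop (l.length - 10)

lemma sorted2_eq_pvS (l : List (Int × String)) :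
    PySem.List.sorted2 l (·.1) (·.2) = pvS l := by
  unfold pvS
  rw [PySem.List.sorted_eq_foldl_insertBy]
  unfold PySem.List.sorted2
  simp only [if_neg (by decide : ¬ (false = true))]
  congr 1
  funext acc x
  congr 1
  funext a b
  rcases lt_trichotomy a.1 b.1 with h | h | h
  · simp [h, Prod.Lex.lt_iff]
  · simp [h, Prod.Lex.lt_iff]
  · simp [h, not_lt_of_gt h, ne_of_gt h, Prod.Lex.lt_iff]

lemma slice_neg10 (xs : List (Int × String)) :
    PySem.List.slice xs (some (-10)) none = xs.drop (xs.length - 10) := by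
  rw [PySem.List.slice_from_neg_ofNat xs 10 (by norm_num)]

lemma length_insertBy (bf : (Int × String) → (Int × String) → Bool) (x : Int × String)
    (l : List (Int × String)) : (PySem.List.insertBy bf x l).length = l.length + 1 := by
  induction l with
  | nil => simp [PySem.List.insertBy]
  | cons y ys ih =>
    by_cases h : bf x y
    · simp [PySem.List.insertBy, h]
    · simp [PySem.List.insertBy, h, ih]

lemma pvS_append_singleton (l : List (Int × String)) (x : Int × String) :
    pvS (l ++ [x]) = PySem.List.insertBy pvBf x (pvS l) := by
  unfold pvS pvBf
  rw [PySem.List.sorted_eq_foldl_insertBy, PySem.List.sorted_eq_foldl_insertBy,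
    List.foldl_append]
  rfl

-- inserting x below a list of elements all ≥ x just prepends it (as a list of values)
lemma insertBy_of_le (x : Int × String) (l : List (Int × String))
    (h : ∀ z ∈ l, toLex x ≤ toLex z) :
    PySem.List.insertBy pvBf x l = x :: l := by
  induction l with
  | nil => rfl
  | cons y ys ih =>
    by_cases hxy : pvBf x y
    · simp [PySem.List.insertBy, hxy]
    · have hyx : toLex y ≤ toLex x := by
        simpa [pvBf, not_lt] using hxy
      have hxy' : toLex x = toLex y := le_antisymm (h y (by simp)) hyx
      have hx : x = y := toLex.injective hxy'
      subst hx
      have := ih (fun z hz => h z (by simp [hz]))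
      simp [PySem.List.insertBy, hxy, this]

-- on a sorted list, Source B's recursive insertion produces the same list as insertBy
lemma insertSorted_eq_insertBy (x : Int × String) (l : List (Int × String))
    (hs : l.Pairwise (fun a b => toLex a ≤ toLex b)) :
    pvInsertSorted l x = PySem.List.insertBy pvBf x l := by
  induction l with
  | nil => rfl
  | cons y ys ih =>
    rw [List.pairwise_cons] at hs
    by_cases h1 : toLex y < toLex x
    · have hbf : pvBf x y = false := by
        simp [pvBf, not_lt_of_gt h1]
      simp [pvInsertSorted, PySem.List.insertBy, h1, hbf, ih hs.2]
    · by_cases h2 : toLex x < toLex y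
      · have hbf : pvBf x y = true := by simp [pvBf, h2]
        simp [pvInsertSorted, PySem.List.insertBy, h1, hbf]
      · have hxy : x = y := toLex.injective (le_antisymm (not_lt.mp h1) (not_lt.mp h2))
        subst hxy
        have hrest : PySem.List.insertBy pvBf x ys = x :: ys :=
          insertBy_of_le x ys (fun z hz => hs.1 z hz)
        simp [pvInsertSorted, PySem.List.insertBy, hrest]

-- B's loop body equals A's loop body on a sorted state of length ≤ 10
lemma stepB_eq_stepA (acc : List (Int × String)) (x : Int × String)
    (hs : acc.Pairwise (fun a b => toLex a ≤ toLex b)) (hlen : acc.length ≤ 10) :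
    (let t := pvInsertSorted acc x
     if 10 < t.length then PySem.List.slice t (some 1) none else t)
      = pvLastTen (pvS (acc ++ [x])) := by
  have hself : pvS acc = acc := PySem.List.sorted_eq_self_of_pairwise _ _ hs
  rw [pvS_append_singleton, hself, ← insertSorted_eq_insertBy x acc hs]
  set t := pvInsertSorted acc x with ht
  have hlent : t.length = acc.length + 1 := by
    rw [ht, insertSorted_eq_insertBy x acc hs, length_insertBy]
  by_cases hc : 10 < t.length
  · have h10 : t.length - 10 = 1 := by omega
    simp only [hc, if_pos, pvLastTen, h10, PySem.List.slice_from_one]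
    rw [List.drop_one]
  · have h10 : t.length - 10 = 0 := by omega
    simp [hc, pvLastTen, h10]

lemma pairwise_pvLastTen_pvS (l : List (Int × String)) :
    (pvLastTen (pvS l)).Pairwise (fun a b => toLex a ≤ toLex b) :=
  (PySem.List.sorted_pairwise l _).sublist (List.drop_sublist _ _)

lemma length_pvLastTen (l : List (Int × String)) : (pvLastTen l).length ≤ 10 := by
  unfold pvLastTen
  rw [List.length_drop]
  omega

lemma insertBy_append_right (x : Int × String) (u t : List (Int × String))
    (h : ∀ y ∈ u, pvBf x y = false) :
    PySem.List.insertBy pvBf x (u ++ t) = u ++ PySem.List.insertBy pvBf x t := by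
  induction u with
  | nil => simp
  | cons y ys ih =>
    have hy : pvBf x y = false := h y (by simp)
    simp only [List.cons_append, PySem.List.insertBy, hy]
    simp [ih (fun z hz => h z (by simp [hz]))]

lemma insertBy_append_left (x : Int × String) (u t : List (Int × String))
    (y0 : Int × String) (hy : y0 ∈ u) (hb : pvBf x y0 = true) :
    PySem.List.insertBy pvBf x (u ++ t) = PySem.List.insertBy pvBf x u ++ t := by
  induction u with
  | nil => simp at hy
  | cons y ys ih =>
    by_cases h : pvBf x y
    · simp [PySem.List.insertBy, h]
    · rcases List.mem_cons.mp hy with rfl | hy'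
      · rw [hb] at h; simp at h
      · simp only [List.cons_append, PySem.List.insertBy, h]
        simp [ih hy']

lemma key_step (l : List (Int × String)) (x : Int × String) :
    pvLastTen (pvS (pvLastTen (pvS l) ++ [x])) = pvLastTen (pvS (l ++ [x])) := by
  have hpwS : (pvS l).Pairwise (fun a b => toLex a ≤ toLex b) :=
    PySem.List.sorted_pairwise l _
  have hS' : pvS (pvLastTen (pvS l)) = pvLastTen (pvS l) :=
    PySem.List.sorted_eq_self_of_pairwise _ _
      (hpwS.sublist (List.drop_sublist _ _))
  rw [pvS_append_singleton, pvS_append_singleton, hS']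
  set s := pvS l with hs
  by_cases hlen : s.length ≤ 10
  · have : pvLastTen s = s := by
      unfold pvLastTen; rw [Nat.sub_eq_zero_of_le hlen]; simp
    rw [this]
  · set u := s.take (s.length - 10) with hu
    set t := s.drop (s.length - 10) with ht
    have hut : u ++ t = s := List.take_append_drop _ _
    have hlt : pvLastTen s = t := rfl
    have htlen : t.length = 10 := by rw [ht, List.length_drop]; omega
    have hulen : u.length = s.length - 10 := by
      rw [hu, List.length_take]; omega
    have hpw := hpwS
    rw [← hut, List.pairwise_append] at hpw
    obtain ⟨-, -, hcross⟩ := hpw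
    rw [hlt]
    by_cases hcase : ∀ y ∈ u, pvBf x y = false
    · rw [← hut, insertBy_append_right x u t hcase]
      unfold pvLastTen
      have h1 : (u ++ PySem.List.insertBy pvBf x t).length - 10 = u.length + 1 := by
        rw [List.length_append, length_insertBy]; omega
      have h2 : (PySem.List.insertBy pvBf x t).length - 10 = 1 := by
        rw [length_insertBy]; omega
      rw [h1, h2, List.drop_append]
      have h3 : List.drop (u.length + 1) u = [] := by
        apply List.drop_eq_nil_of_le; omega
      rw [h3]
      simp
    · simp only [not_forall, Bool.not_eq_false, exists_prop] at hcase
      obtain ⟨y0, hy0, hb'⟩ := hcase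
      rw [← hut, insertBy_append_left x u t y0 hy0 hb']
      obtain ⟨m, t', ht'⟩ := List.exists_cons_of_ne_nil
        (show t ≠ [] by intro h; rw [h] at htlen; simp at htlen)
      have hm : pvBf x m = true := by
        have hym : toLex y0 ≤ toLex m := hcross y0 hy0 m (by rw [ht']; simp)
        have hxy : toLex x < toLex y0 := by simpa [pvBf] using hb'
        simp only [pvBf, decide_eq_true_eq]
        exact lt_of_lt_of_le hxy hym
      rw [ht']
      have hL : PySem.List.insertBy pvBf x (m :: t') = x :: m :: t' := by
        simp [PySem.List.insertBy, hm]
      rw [hL]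
      unfold pvLastTen
      have h1 : (x :: m :: t').length - 10 = 1 := by
        simp only [List.length_cons]
        have : t'.length = 9 := by rw [ht'] at htlen; simp at htlen; omega
        omega
      have h2 : (PySem.List.insertBy pvBf x u ++ m :: t').length - 10 = u.length + 1 := by
        rw [List.length_append, length_insertBy]
        have : (m :: t').length = 10 := by rw [← ht']; exact htlen
        omega
      rw [h1, h2, List.drop_append, length_insertBy]
      have h3 : List.drop (u.length + 1) (PySem.List.insertBy pvBf x u) = [] := by
        apply List.drop_eq_nil_of_le; rw [length_insertBy]
      rw [h3]
      simp

lemma loopA (rest pre : List (Int × String)) :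
    List.foldl (fun acc x => pvLastTen (pvS (acc ++ [x]))) (pvLastTen (pvS pre)) rest
      = pvLastTen (pvS (pre ++ rest)) := by
  induction rest generalizing pre with
  | nil => simp
  | cons x xs ih =>
    simp only [List.foldl_cons]
    rw [key_step pre x, ih (pre ++ [x])]
    simp

lemma loopA0 (values : List (Int × String)) :
    List.foldl (fun acc x => pvLastTen (pvS (acc ++ [x]))) [] values
      = pvLastTen (pvS values) := by
  have h0 : pvLastTen (pvS []) = [] := rfl
  have h := loopA values []
  rw [h0] at h
  simpa using h

lemma loopB (rest pre : List (Int × String)) :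
    List.foldl (fun top pair =>
        let t := pvInsertSorted top pair
        if 10 < t.length then PySem.List.slice t (some 1) none else t)
      (pvLastTen (pvS pre)) rest
      = pvLastTen (pvS (pre ++ rest)) := by
  induction rest generalizing pre with
  | nil => simp
  | cons x xs ih =>
    simp only [List.foldl_cons]
    rw [stepB_eq_stepA _ x (pairwise_pvLastTen_pvS pre) (length_pvLastTen _),
      key_step pre x]
    have := ih (pre ++ [x])
    simpa using this

lemma loopB0 (values : List (Int × String)) :
    List.foldl (fun top pair =>
        let t := pvInsertSorted top pair
        if 10 < t.length then PySem.List.slice t (some 1) none else t)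
      [] values
      = pvLastTen (pvS values) := by
  have h0 : pvLastTen (pvS []) = [] := rfl
  have h := loopB values []
  rw [h0] at h
  simpa using h

lemma stepA_eq : (fun (topten : List (Int × String)) (p : Int × String) =>
      PySem.List.slice (PySem.List.sorted2 (topten ++ [(p.1, p.2)]) (·.1) (·.2)) (some (-10)) none)
      = fun acc x => pvLastTen (pvS (acc ++ [x])) := by
  funext acc p
  rw [sorted2_eq_pvS, slice_neg10]
  rfl

-- ===== VERDICT (by name: the statement is the Claim_ definition above) =====
theorem ttreducer_spec : Claim_equal_ttreducer := by
  intro key values _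
  simp only [Spec_ttreducer, ttreducer, ttreducer_alt]
  rw [stepA_eq, loopA0 values, loopB0 values]
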